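-- pv_equiv track=rewrite | github.com/HabsaTheDog/Trainscanner | scripts/data/netex_extract_qa_network.py | build_entry_chunks
-- ===== SOURCE A (Python) =====
-- import math
--
-- def build_entry_chunks(
--     entries: list[str], worker_count: int
-- ) -> list[list[tuple[int, str]]]:
--     if worker_count <= 1 or len(entries) <= 1:
--         return [[(index, entry) for index, entry in enumerate(entries)]]
--
--     chunk_size = max(1, math.ceil(len(entries) / worker_count))
--     chunks: list[list[tuple[int, str]]] = []
--     for start_index in range(0, len(entries), chunk_size):
--         chunk_entries = [
--             (entry_index, entries[entry_index])
--             for entry_index in range(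
--                 start_index, min(len(entries), start_index + chunk_size)
--             )
--         ]
--         if chunk_entries:
--             chunks.append(chunk_entries)
--     return chunks
-- ===== SOURCE B (Python) =====
-- import math
--
--
-- def build_entry_chunks(
--     entries: list[str], worker_count: int
-- ) -> list[list[tuple[int, str]]]:
--     if worker_count <= 1 or len(entries) <= 1:
--         return [list(enumerate(entries))]
--     chunk_size = max(1, math.ceil(len(entries) / worker_count))
--     chunks = []
--     current = []
--     for pair in enumerate(entries):
--         current.append(pair)
--         if len(current) == chunk_size:
--             chunks.append(current)
--             current = []
--     if current:
--         chunks.append(current)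
--     return chunks
-- ===== Notes on version B (the rewrite author's own statement) =====
-- stated objective: alternative
-- what changed: B replaces A's index-arithmetic partitioning (an outer range(start, n, chunk_size) loop that rebuilds each chunk's (index, entry) tuples from an index window and filters empty chunks) with a single streaming pass: it iterates the enumerated entries once, appending each pair to a buffer that is flushed into the result whenever it reaches chunk_size, with a final flush of the remainder.
import Mathlib
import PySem

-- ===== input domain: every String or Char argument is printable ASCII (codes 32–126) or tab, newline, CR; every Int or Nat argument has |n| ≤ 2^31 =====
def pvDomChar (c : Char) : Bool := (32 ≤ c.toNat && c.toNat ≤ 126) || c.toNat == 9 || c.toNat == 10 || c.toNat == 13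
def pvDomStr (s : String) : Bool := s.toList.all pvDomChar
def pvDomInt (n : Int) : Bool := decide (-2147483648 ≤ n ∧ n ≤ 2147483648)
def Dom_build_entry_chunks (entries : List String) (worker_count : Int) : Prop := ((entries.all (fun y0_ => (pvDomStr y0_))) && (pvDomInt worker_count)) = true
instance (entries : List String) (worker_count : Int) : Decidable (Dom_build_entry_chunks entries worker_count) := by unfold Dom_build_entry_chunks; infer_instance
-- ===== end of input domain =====

-- B streams the enumerated entries once through a buffer that is flushed every chunk_size
-- elements, instead of A's index-arithmetic loop rebuilding each chunk from an index window
-- (objective: alternative single-pass decomposition, same cost).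

-- ===== PORT A =====
-- entries[entry_index] is always in range in A (the range is clamped by min), so the
-- index access is ported by pyGetD with an unused default — exact on every admitted input.
def build_entry_chunks (entries : List String) (worker_count : Int) : List (List (Int × String)) :=
  if worker_count ≤ 1 ∨ (entries.length : Int) ≤ 1 then
    [(PySem.List.enumerate entries).map (fun p => (p.1, p.2))]
  else
    let n : Int := (entries.length : Int)
    let chunk_size : Int := max 1 (-(PySem.Int.floordiv (-n) worker_count))  -- math.ceil(n / worker_count)
    (PySem.List.pyRange 0 n chunk_size).foldl
      (fun chunks start_index =>
        let chunk_entries :=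
          (PySem.List.pyRange start_index (min n (start_index + chunk_size)) 1).map
            (fun entry_index => (entry_index, PySem.List.pyGetD entries entry_index ""))
        if chunk_entries ≠ [] then chunks ++ [chunk_entries] else chunks)
      []

-- ===== PORT B =====
def build_entry_chunks_alt (entries : List String) (worker_count : Int) : List (List (Int × String)) :=
  if worker_count ≤ 1 ∨ (entries.length : Int) ≤ 1 then
    [PySem.List.enumerate entries]
  else
    let chunk_size : Int := max 1 (-(PySem.Int.floordiv (-(entries.length : Int)) worker_count))
    let st := (PySem.List.enumerate entries).foldl
      (fun (st : List (List (Int × String)) × List (Int × String)) p =>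
        let current := st.2 ++ [p]
        if (current.length : Int) = chunk_size then (st.1 ++ [current], []) else (st.1, current))
      ([], [])
    if st.2 ≠ [] then st.1 ++ [st.2] else st.1

-- ===== PRECONDITION & SPEC =====
def Spec_build_entry_chunks (entries : List String) (worker_count : Int) (out : List (List (Int × String))) : Prop := out = build_entry_chunks_alt entries worker_count
instance (entries : List String) (worker_count : Int) (out : List (List (Int × String))) : Decidable (Spec_build_entry_chunks entries worker_count out) := by unfold Spec_build_entry_chunks; infer_instance

-- ===== CLAIM (what is proved, stated in full; the proofs are below) =====
def Claim_equal_build_entry_chunks : Prop := ∀ (entries : List String) (worker_count : Int), Dom_build_entry_chunks entries worker_count → Spec_build_entry_chunks entries worker_count (build_entry_chunks entries worker_count)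

-- ===== LEMMAS AND PROOFS =====

-- proof-only reference chunking: split a list into consecutive blocks of cs elements
-- (fuel bounds the recursion; any fuel ≥ L.length computes the real chunking)
def pvChunk {α : Type} (cs : Nat) : Nat → List α → List (List α)
  | _, [] => []
  | 0, L => [L]
  | fuel+1, L => L.take cs :: pvChunk cs fuel (L.drop cs)

theorem pv_enumerate_take {α : Type} (xs : List α) (t : Nat) (s : Int) :
    (PySem.List.enumerate xs s).take t = PySem.List.enumerate (xs.take t) s := by
  induction xs generalizing t s with
  | nil => simp [PySem.List.enumerate_nil]
  | cons x xs ih =>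
    cases t with
    | zero => simp
    | succ t => simp [PySem.List.enumerate_cons, ih]

theorem pv_enumerate_drop {α : Type} (xs : List α) (k : Nat) (s : Int) :
    (PySem.List.enumerate xs s).drop k = PySem.List.enumerate (xs.drop k) (s + k) := by
  induction xs generalizing k s with
  | nil => simp [PySem.List.enumerate_nil]
  | cons x xs ih =>
    cases k with
    | zero => simp
    | succ k =>
      simp only [PySem.List.enumerate_cons, List.drop_succ_cons]
      rw [ih]
      congr 1
      push_cast
      ring

theorem pv_enumerate_length {α : Type} (xs : List α) (s : Int) :
    (PySem.List.enumerate xs s).length = xs.length := by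
  induction xs generalizing s with
  | nil => simp [PySem.List.enumerate_nil]
  | cons x xs ih => simp [PySem.List.enumerate_cons, ih]

-- A's chunk comprehension computes exactly a take/drop window of the enumerated list.
theorem pv_chunkA_eq (xs : List String) (t : Nat) (sn : Nat) :
    (PySem.List.pyRange (sn : Int) (min (xs.length : Int) ((sn : Int) + (t : Int))) 1).map
      (fun i => (i, PySem.List.pyGetD xs i "")) =
    PySem.List.enumerate ((xs.drop sn).take t) (sn : Int) := by
  induction t generalizing sn with
  | zero =>
    rw [PySem.List.pyRange_one_eq_nil (by omega : min (xs.length : Int) ((sn : Int) + ((0:Nat) : Int)) ≤ (sn : Int))]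
    simp [PySem.List.enumerate_nil]
  | succ t ih =>
    by_cases h : sn < xs.length
    · have hlt : (sn : Int) < min (xs.length : Int) ((sn : Int) + ((t+1 : Nat) : Int)) := by
        push_cast; omega
      rw [PySem.List.pyRange_one_cons hlt]
      have hmin : min (xs.length : Int) ((sn : Int) + ((t+1 : Nat) : Int))
          = min (xs.length : Int) (((sn+1 : Nat) : Int) + (t : Int)) := by push_cast; ring_nf
      have hcast : (sn : Int) + 1 = ((sn + 1 : Nat) : Int) := by push_cast; ring
      rw [List.map_cons, hmin, hcast, ih]
      rw [List.drop_eq_getElem_cons h]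
      simp only [List.take_succ_cons, PySem.List.enumerate_cons]
      simp [PySem.List.pyGetD_natCast, h]
    · rw [PySem.List.pyRange_one_eq_nil (by push_cast; omega : min (xs.length : Int) ((sn : Int) + ((t+1 : Nat) : Int)) ≤ (sn : Int))]
      rw [List.drop_eq_nil_of_le (by omega)]
      simp [PySem.List.enumerate_nil]

-- A's filtered fold of index-range chunks is the map of slices of the enumerated list
theorem pv_else_branch (entries : List String) (cs : Int) (hcs_pos : 0 < cs) :
    (PySem.List.pyRange 0 (entries.length : Int) cs).foldl
      (fun chunks start_index =>
        let chunk_entries :=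
          (PySem.List.pyRange start_index (min (entries.length : Int) (start_index + cs)) 1).map
            (fun entry_index => (entry_index, PySem.List.pyGetD entries entry_index ""))
        if chunk_entries ≠ [] then chunks ++ [chunk_entries] else chunks)
      [] =
    (PySem.List.pyRange 0 (entries.length : Int) cs).map
      (fun i => PySem.List.slice (PySem.List.enumerate entries) (some i) (some (i + cs))) := by
  have hmem : ∀ s ∈ PySem.List.pyRange 0 (entries.length : Int) cs, 0 ≤ s ∧ s < (entries.length : Int) := by
    intro s hs
    have := (PySem.List.mem_pyRange_iff_of_pos hcs_pos s).mp hs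
    exact ⟨this.1, this.2.1⟩
  rw [PySem.List.foldl_append_ite
    (fun s => (PySem.List.pyRange s (min (entries.length : Int) (s + cs)) 1).map
      (fun entry_index => (entry_index, PySem.List.pyGetD entries entry_index "")) ≠ [])
    (fun s => (PySem.List.pyRange s (min (entries.length : Int) (s + cs)) 1).map
      (fun entry_index => (entry_index, PySem.List.pyGetD entries entry_index "")))]
  rw [List.nil_append]
  have hfilter : (PySem.List.pyRange 0 (entries.length : Int) cs).filter
      (fun s => decide ((PySem.List.pyRange s (min (entries.length : Int) (s + cs)) 1).map
        (fun entry_index => (entry_index, PySem.List.pyGetD entries entry_index "")) ≠ [])) =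
      PySem.List.pyRange 0 (entries.length : Int) cs := by
    apply List.filter_eq_self.mpr
    intro s hs
    obtain ⟨h0, hlt⟩ := hmem s hs
    simp only [decide_not, Bool.not_eq_eq_eq_not, Bool.not_true, decide_eq_false_iff_not]
    intro hempty
    have h1 : PySem.List.pyRange s (min (entries.length : Int) (s + cs)) 1 = [] :=
      List.map_eq_nil_iff.mp hempty
    have h2 := congrArg List.length h1
    rw [PySem.List.length_pyRange_one] at h2
    simp only [List.length_nil] at h2
    omega
  rw [hfilter]
  apply List.map_congr_left
  intro s hs
  obtain ⟨h0, hlt⟩ := hmem s hs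
  obtain ⟨sn, rfl⟩ := Int.eq_ofNat_of_zero_le h0
  obtain ⟨csn, hcsn⟩ := Int.eq_ofNat_of_zero_le hcs_pos.le
  rw [hcsn, PySem.List.slice_natCast_add, pv_enumerate_drop, pv_enumerate_take,
    pv_chunkA_eq entries csn sn]
  norm_num

-- step-cs range over an empty interval
theorem pv_pyRange_nonpos (b cs : Int) (hb : b ≤ 0) (hcs : 0 < cs) :
    PySem.List.pyRange 0 b cs = [] := by
  rw [PySem.List.pyRange_of_pos 0 b hcs, if_neg (by omega)]
  simp

-- peel the first start index off a step-cs range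
theorem pv_pyRange_cons (n cs : Int) (h0 : 0 < n) (hcs : 0 < cs) :
    PySem.List.pyRange 0 n cs = 0 :: (PySem.List.pyRange 0 (n - cs) cs).map (· + cs) := by
  rw [PySem.List.pyRange_of_pos 0 n hcs, PySem.List.pyRange_of_pos 0 (n - cs) hcs, if_pos h0]
  have hquot : (n - 0 + cs - 1) / cs = (n - 1) / cs + 1 := by
    have : n - 0 + cs - 1 = (n - 1) + 1 * cs := by ring
    rw [this, Int.add_mul_ediv_right _ _ (by omega : cs ≠ 0)]
  have hq0 : 0 ≤ (n - 1) / cs := Int.ediv_nonneg (by omega) (by omega)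
  have hcount : ((n - 0 + cs - 1) / cs).toNat
      = (if 0 < n - cs then ((n - cs - 0 + cs - 1) / cs).toNat else 0) + 1 := by
    by_cases hlt : 0 < n - cs
    · rw [if_pos hlt]
      have h1 : n - cs - 0 + cs - 1 = n - 1 := by ring
      rw [h1, hquot]
      omega
    · rw [if_neg hlt]
      have hz : (n - 1) / cs = 0 := Int.ediv_eq_zero_of_lt (by omega) (by omega)
      rw [hquot, hz]
      omega
  rw [hcount, List.range_succ_eq_map]
  simp only [List.map_cons, List.map_map]
  congr 1
  · simp
  · apply List.map_congr_left
    intro k _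
    simp only [Function.comp_apply]
    push_cast
    ring

-- unfolding pvChunk on a nonempty list with nonzero fuel
theorem pvChunk_cons {α : Type} (c f : Nat) (L : List α) (h : L ≠ []) :
    pvChunk c (f+1) L = L.take c :: pvChunk c f (L.drop c) := by
  cases L with
  | nil => exact absurd rfl h
  | cons x xs => rfl

-- the map of cs-wide slices is the reference chunking
theorem pv_slices_eq_chunk (cs : Int) (hcs : 0 < cs) :
    ∀ (fuel : Nat) (L : List (Int × String)), L.length ≤ fuel →
    (PySem.List.pyRange 0 (L.length : Int) cs).map
      (fun i => PySem.List.slice L (some i) (some (i + cs))) = pvChunk cs.toNat fuel L := by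
  intro fuel
  induction fuel with
  | zero =>
    intro L hL
    have : L = [] := List.eq_nil_of_length_eq_zero (by omega)
    subst this
    simp [pvChunk, pv_pyRange_nonpos 0 cs le_rfl hcs]
  | succ f ih =>
    intro L hL
    by_cases hLnil : L = []
    · subst hLnil
      simp [pvChunk, pv_pyRange_nonpos 0 cs le_rfl hcs]
    · have hn : 0 < (L.length : Int) := by
        have : L.length ≠ 0 := fun h => hLnil (List.eq_nil_of_length_eq_zero h)
        omega
      obtain ⟨c, hc⟩ := Int.eq_ofNat_of_zero_le hcs.le
      have hc1 : 1 ≤ c := by omega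
      rw [pv_pyRange_cons _ cs hn hcs, List.map_cons, List.map_map]
      have hhead : PySem.List.slice L (some 0) (some (0 + cs)) = L.take c := by
        have h0 : PySem.List.slice L (some ((0:Nat):Int)) (some (((0:Nat):Int) + ((c:Nat):Int)))
            = List.take c (List.drop 0 L) := PySem.List.slice_natCast_add L 0 c
        simp only [Nat.cast_zero, List.drop_zero] at h0
        rw [hc]
        exact h0
      have htail : ((PySem.List.pyRange 0 ((L.length : Int) - cs) cs).map
          ((fun i => PySem.List.slice L (some i) (some (i + cs))) ∘ (· + cs))) =
          (PySem.List.pyRange 0 (((L.drop c).length : Int)) cs).map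
            (fun i => PySem.List.slice (L.drop c) (some i) (some (i + cs))) := by
        have hlend : (L.drop c).length = L.length - c := List.length_drop
        by_cases hbig : cs < (L.length : Int)
        · have hrange : (((L.drop c).length : Int)) = (L.length : Int) - cs := by
            rw [hlend]; push_cast [Nat.cast_sub (by omega : c ≤ L.length)]; omega
          rw [hrange]
          apply List.map_congr_left
          intro i hi
          obtain ⟨hi0, -⟩ := (PySem.List.mem_pyRange_iff_of_pos hcs i).mp hi
          obtain ⟨j, rfl⟩ := Int.eq_ofNat_of_zero_le hi0
          simp only [Function.comp_apply]
          have hA : PySem.List.slice L (some ((j:Int) + cs)) (some ((j:Int) + cs + cs))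
              = List.take c (List.drop (j+c) L) := by
            have h := PySem.List.slice_natCast_add L (j+c) c
            rw [show (((j+c : Nat)):Int) = (j:Int) + cs by push_cast; omega] at h
            rw [show ((c:Nat):Int) = cs from hc.symm] at h
            exact h
          have hB : PySem.List.slice (L.drop c) (some (j:Int)) (some ((j:Int) + cs))
              = List.take c (List.drop j (L.drop c)) := by
            have h := PySem.List.slice_natCast_add (L.drop c) j c
            rw [show ((c:Nat):Int) = cs from hc.symm] at h
            exact h
          rw [hA, hB, List.drop_drop]
          congr 2
          omega
        · have h1 : (L.length : Int) - cs ≤ 0 := by omega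
          have h2 : (((L.drop c).length : Int)) ≤ 0 := by
            rw [hlend]; omega
          rw [pv_pyRange_nonpos _ cs h1 hcs, pv_pyRange_nonpos _ cs h2 hcs]
          simp
      rw [hhead, htail, ih (L.drop c) (by
        have hld : (L.drop c).length = L.length - c := List.length_drop
        omega)]
      rw [pvChunk_cons _ _ _ hLnil]
      have hcn : cs.toNat = c := by omega
      rw [hcn]

-- B's buffer fills up to exactly cs elements and flushes
theorem pv_fill (cs : Int) :
    ∀ (M cur : List (Int × String)) (C : List (List (Int × String))),
    ((cur.length : Int) + (M.length : Int) = cs) → M ≠ [] →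
    M.foldl (fun (st : List (List (Int × String)) × List (Int × String)) p =>
        let current := st.2 ++ [p]
        if (current.length : Int) = cs then (st.1 ++ [current], []) else (st.1, current))
      (C, cur) = (C ++ [cur ++ M], []) := by
  intro M
  induction M with
  | nil => intro cur C _ hne; exact absurd rfl hne
  | cons m M' ih =>
    intro cur C hlen _
    simp only [List.foldl_cons]
    cases hM' : M' with
    | nil =>
      have hcond : (((cur ++ [m]).length : Int)) = cs := by
        simp only [List.length_append, List.length_cons, List.length_nil]
        subst hM'
        simp only [List.length_cons, List.length_nil] at hlen
        push_cast at hlen ⊢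
        omega
      rw [if_pos hcond]
      subst hM'
      simp
    | cons y ys =>
      have hcond : ¬ (((cur ++ [m]).length : Int)) = cs := by
        simp only [List.length_append, List.length_cons, List.length_nil]
        have : M'.length ≠ 0 := by simp [hM']
        simp only [List.length_cons] at hlen
        push_cast at hlen ⊢
        omega
      rw [if_neg hcond, ← hM']
      rw [ih (cur ++ [m]) C (by
        simp only [List.length_append, List.length_cons, List.length_nil]
        simp only [List.length_cons] at hlen
        push_cast at hlen ⊢
        omega) (by simp [hM'])]
      simp

-- a buffer that never reaches cs just accumulates
theorem pv_partial (cs : Int) :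
    ∀ (M cur : List (Int × String)) (C : List (List (Int × String))),
    ((cur.length : Int) + (M.length : Int) < cs) →
    M.foldl (fun (st : List (List (Int × String)) × List (Int × String)) p =>
        let current := st.2 ++ [p]
        if (current.length : Int) = cs then (st.1 ++ [current], []) else (st.1, current))
      (C, cur) = (C, cur ++ M) := by
  intro M
  induction M with
  | nil => intro cur C _; simp
  | cons m M' ih =>
    intro cur C hlen
    simp only [List.foldl_cons]
    have hcond : ¬ (((cur ++ [m]).length : Int)) = cs := by
      simp only [List.length_append, List.length_cons, List.length_nil]
      simp only [List.length_cons] at hlen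
      push_cast at hlen ⊢
      omega
    rw [if_neg hcond]
    rw [ih (cur ++ [m]) C (by
      simp only [List.length_append, List.length_cons, List.length_nil]
      simp only [List.length_cons] at hlen
      push_cast at hlen ⊢
      omega)]
    simp

-- B's streaming fold (with final flush) is the reference chunking
theorem pv_stream_eq_chunk (cs : Int) (hcs : 0 < cs) :
    ∀ (fuel : Nat) (L : List (Int × String)) (C : List (List (Int × String))), L.length ≤ fuel →
    (let st := L.foldl (fun (st : List (List (Int × String)) × List (Int × String)) p =>
        let current := st.2 ++ [p]
        if (current.length : Int) = cs then (st.1 ++ [current], []) else (st.1, current))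
      (C, []);
     if st.2 ≠ [] then st.1 ++ [st.2] else st.1) = C ++ pvChunk cs.toNat fuel L := by
  intro fuel
  induction fuel with
  | zero =>
    intro L C hL
    have : L = [] := List.eq_nil_of_length_eq_zero (by omega)
    subst this
    simp [pvChunk]
  | succ f ih =>
    intro L C hL
    by_cases hLnil : L = []
    · subst hLnil
      simp [pvChunk]
    · obtain ⟨c, hc⟩ := Int.eq_ofNat_of_zero_le hcs.le
      have hc1 : 1 ≤ c := by omega
      have hLne : L.length ≠ 0 := fun h => hLnil (List.eq_nil_of_length_eq_zero h)
      rw [pvChunk_cons _ _ _ hLnil]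
      by_cases hsmall : (L.length : Int) < cs
      · rw [pv_partial cs L [] C (by simpa using hsmall)]
        simp only [List.nil_append]
        rw [if_pos hLnil]
        have htake : L.take cs.toNat = L := List.take_of_length_le (by omega)
        have hdrop : L.drop cs.toNat = [] := List.drop_eq_nil_of_le (by omega)
        rw [htake, hdrop]
        cases f <;> simp [pvChunk]
      · have hsplit : L.take c ++ L.drop c = L := List.take_append_drop c L
        conv_lhs => rw [← hsplit]
        rw [List.foldl_append]
        rw [pv_fill cs (L.take c) [] C (by
          simp only [List.length_take, List.length_nil]
          push_cast
          omega) (by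
          intro h
          have := congrArg List.length h
          simp only [List.length_take, List.length_nil] at this
          omega)]
        simp only [List.nil_append]
        rw [ih (L.drop c) (C ++ [L.take c]) (by rw [List.length_drop]; omega)]
        have hcn : cs.toNat = c := by omega
        rw [hcn, List.append_assoc]
        simp

-- ===== VERDICT (by name: the statement is the Claim_ definition above) =====
theorem build_entry_chunks_spec : Claim_equal_build_entry_chunks := by
  intro entries worker_count _
  unfold Spec_build_entry_chunks build_entry_chunks build_entry_chunks_alt
  by_cases hg : worker_count ≤ 1 ∨ (entries.length : Int) ≤ 1
  · rw [if_pos hg, if_pos hg]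
    simp
  · rw [if_neg hg, if_neg hg]
    have hcs : 0 < max 1 (-(PySem.Int.floordiv (-(entries.length : Int)) worker_count)) := by
      have := le_max_left 1 (-(PySem.Int.floordiv (-(entries.length : Int)) worker_count))
      omega
    rw [pv_else_branch entries _ hcs]
    have hslices := pv_slices_eq_chunk _ hcs (PySem.List.enumerate entries).length
      (PySem.List.enumerate entries) le_rfl
    have hstream := pv_stream_eq_chunk _ hcs (PySem.List.enumerate entries).length
      (PySem.List.enumerate entries) [] le_rfl
    rw [pv_enumerate_length] at hslices hstream
    simp only [List.nil_append] at hstream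
    rw [hslices]
    exact hstream.symm
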